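-- pv_equiv track=rewrite | github.com/leonardean/dex-operator | dexcrc16.py | crcChar
-- ===== SOURCE A (Python) =====
-- def crcChar(crc, data):
--     data = ord(data)
--     DATA_0 = 0
--     BCC_0 = 0
--     BCC_1 = 0
--     BCC_14 = 0
--     X2 = 0
--     X15 = 0
--     X16 = 0
--     BCC = crc
--     for j in range(0,8):
--         DATA_0 = (data >> j) & 0x0001
--         BCC_0  = (BCC) & 0x0001
--         BCC_1  = (BCC >>  1) & 0x0001
--         BCC_14 = (BCC >> 14) & 0x0001
--         X16 = (BCC_0  ^ DATA_0) & 0x0001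
--         X15 = (BCC_1  ^ X16) & 0x0001
--         X2  = (BCC_14 ^ X16) & 0x0001
--         BCC = BCC >> 1
--         BCC = BCC & 0x5FFE
--         BCC = BCC | X15
--         BCC = BCC | (X2  << 13)
--         BCC = BCC | (X16 << 15)
--     return BCC
-- ===== SOURCE B (Python) =====
-- _CRC16_TABLE = [
--     0x0000, 0xC0C1, 0xC181, 0x0140, 0xC301, 0x03C0, 0x0280, 0xC241,
--     0xC601, 0x06C0, 0x0780, 0xC741, 0x0500, 0xC5C1, 0xC481, 0x0440,
--     0xCC01, 0x0CC0, 0x0D80, 0xCD41, 0x0F00, 0xCFC1, 0xCE81, 0x0E40,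
--     0x0A00, 0xCAC1, 0xCB81, 0x0B40, 0xC901, 0x09C0, 0x0880, 0xC841,
--     0xD801, 0x18C0, 0x1980, 0xD941, 0x1B00, 0xDBC1, 0xDA81, 0x1A40,
--     0x1E00, 0xDEC1, 0xDF81, 0x1F40, 0xDD01, 0x1DC0, 0x1C80, 0xDC41,
--     0x1400, 0xD4C1, 0xD581, 0x1540, 0xD701, 0x17C0, 0x1680, 0xD641,
--     0xD201, 0x12C0, 0x1380, 0xD341, 0x1100, 0xD1C1, 0xD081, 0x1040,
--     0xF001, 0x30C0, 0x3180, 0xF141, 0x3300, 0xF3C1, 0xF281, 0x3240,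
--     0x3600, 0xF6C1, 0xF781, 0x3740, 0xF501, 0x35C0, 0x3480, 0xF441,
--     0x3C00, 0xFCC1, 0xFD81, 0x3D40, 0xFF01, 0x3FC0, 0x3E80, 0xFE41,
--     0xFA01, 0x3AC0, 0x3B80, 0xFB41, 0x3900, 0xF9C1, 0xF881, 0x3840,
--     0x2800, 0xE8C1, 0xE981, 0x2940, 0xEB01, 0x2BC0, 0x2A80, 0xEA41,
--     0xEE01, 0x2EC0, 0x2F80, 0xEF41, 0x2D00, 0xEDC1, 0xEC81, 0x2C40,
--     0xE401, 0x24C0, 0x2580, 0xE541, 0x2700, 0xE7C1, 0xE681, 0x2640,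
--     0x2200, 0xE2C1, 0xE381, 0x2340, 0xE101, 0x21C0, 0x2080, 0xE041,
--     0xA001, 0x60C0, 0x6180, 0xA141, 0x6300, 0xA3C1, 0xA281, 0x6240,
--     0x6600, 0xA6C1, 0xA781, 0x6740, 0xA501, 0x65C0, 0x6480, 0xA441,
--     0x6C00, 0xACC1, 0xAD81, 0x6D40, 0xAF01, 0x6FC0, 0x6E80, 0xAE41,
--     0xAA01, 0x6AC0, 0x6B80, 0xAB41, 0x6900, 0xA9C1, 0xA881, 0x6840,
--     0x7800, 0xB8C1, 0xB981, 0x7940, 0xBB01, 0x7BC0, 0x7A80, 0xBA41,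
--     0xBE01, 0x7EC0, 0x7F80, 0xBF41, 0x7D00, 0xBDC1, 0xBC81, 0x7C40,
--     0xB401, 0x74C0, 0x7580, 0xB541, 0x7700, 0xB7C1, 0xB681, 0x7640,
--     0x7200, 0xB2C1, 0xB381, 0x7340, 0xB101, 0x71C0, 0x7080, 0xB041,
--     0x5000, 0x90C1, 0x9181, 0x5140, 0x9301, 0x53C0, 0x5280, 0x9241,
--     0x9601, 0x56C0, 0x5780, 0x9741, 0x5500, 0x95C1, 0x9481, 0x5440,
--     0x9C01, 0x5CC0, 0x5D80, 0x9D41, 0x5F00, 0x9FC1, 0x9E81, 0x5E40,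
--     0x5A00, 0x9AC1, 0x9B81, 0x5B40, 0x9901, 0x59C0, 0x5880, 0x9841,
--     0x8801, 0x48C0, 0x4980, 0x8941, 0x4B00, 0x8BC1, 0x8A81, 0x4A40,
--     0x4E00, 0x8EC1, 0x8F81, 0x4F40, 0x8D01, 0x4DC0, 0x4C80, 0x8C41,
--     0x4400, 0x84C1, 0x8581, 0x4540, 0x8701, 0x47C0, 0x4680, 0x8641,
--     0x8201, 0x42C0, 0x4380, 0x8341, 0x4100, 0x81C1, 0x8081, 0x4040,
-- ]
--
--
-- def crcChar(crc, data):
--     b = ord(data)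
--     c = crc & 0xFFFF
--     return (c >> 8) ^ _CRC16_TABLE[(c ^ b) & 0xFF]
-- ===== Notes on version B (the rewrite author's own statement) =====
-- stated objective: faster
-- what changed: Replaced the per-bit 8-iteration shift/xor loop (this is CRC-16/MODBUS, reflected poly 0xA001) by the classic byte-at-a-time table-driven form with a literal 256-entry lookup table, so each call is one mask, one shift, one xor and one table read.
import Mathlib
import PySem

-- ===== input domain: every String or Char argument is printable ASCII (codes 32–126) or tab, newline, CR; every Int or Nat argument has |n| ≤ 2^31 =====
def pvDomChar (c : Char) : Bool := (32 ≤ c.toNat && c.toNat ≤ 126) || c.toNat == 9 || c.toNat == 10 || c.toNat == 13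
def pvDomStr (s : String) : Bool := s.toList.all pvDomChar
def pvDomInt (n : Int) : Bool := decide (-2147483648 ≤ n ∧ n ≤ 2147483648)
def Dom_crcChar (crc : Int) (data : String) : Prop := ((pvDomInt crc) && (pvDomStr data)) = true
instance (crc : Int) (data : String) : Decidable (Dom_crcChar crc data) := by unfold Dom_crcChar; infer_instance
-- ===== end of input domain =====

-- B replaces A's per-bit 8-iteration CRC loop (CRC-16/MODBUS, reflected poly 0xA001) by the
-- classic byte-at-a-time table lookup with a literal 256-entry table; equivalence of the return
-- values is proved on single-character data (ord raises otherwise).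

-- ===== PORT A =====
-- loop body of A (one iteration of `for j in range(0,8)`), kept as a helper
def crcStep (dat BCC j : Int) : Int :=
  let DATA_0 := PySem.Int.band (dat >>> j.toNat) 1
  let BCC_0  := PySem.Int.band BCC 1
  let BCC_1  := PySem.Int.band (BCC >>> (1:Nat)) 1
  let BCC_14 := PySem.Int.band (BCC >>> (14:Nat)) 1
  let X16 := PySem.Int.band (PySem.Int.bxor BCC_0 DATA_0) 1
  let X15 := PySem.Int.band (PySem.Int.bxor BCC_1 X16) 1
  let X2  := PySem.Int.band (PySem.Int.bxor BCC_14 X16) 1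
  let BCC := BCC >>> (1:Nat)
  let BCC := PySem.Int.band BCC 24574
  let BCC := PySem.Int.bor BCC X15
  let BCC := PySem.Int.bor BCC (X2 <<< (13:Nat))
  PySem.Int.bor BCC (X16 <<< (15:Nat))

def crcChar (crc : Int) (data : String) : Int :=
  match data.toList with
  | [ch] =>
    -- data = ord(data); ord raises TypeError unless the string has exactly one character (outside Pre_)
    let dat : Int := ch.toNat
    (PySem.List.pyRange 0 8 1).foldl (fun BCC j => crcStep dat BCC j) crc
  | _ => 0

-- ===== PORT B =====
def crcTable : List Int := [
  0, 49345, 49537, 320, 49921, 960, 640, 49729,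
  50689, 1728, 1920, 51009, 1280, 50625, 50305, 1088,
  52225, 3264, 3456, 52545, 3840, 53185, 52865, 3648,
  2560, 51905, 52097, 2880, 51457, 2496, 2176, 51265,
  55297, 6336, 6528, 55617, 6912, 56257, 55937, 6720,
  7680, 57025, 57217, 8000, 56577, 7616, 7296, 56385,
  5120, 54465, 54657, 5440, 55041, 6080, 5760, 54849,
  53761, 4800, 4992, 54081, 4352, 53697, 53377, 4160,
  61441, 12480, 12672, 61761, 13056, 62401, 62081, 12864,
  13824, 63169, 63361, 14144, 62721, 13760, 13440, 62529,
  15360, 64705, 64897, 15680, 65281, 16320, 16000, 65089,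
  64001, 15040, 15232, 64321, 14592, 63937, 63617, 14400,
  10240, 59585, 59777, 10560, 60161, 11200, 10880, 59969,
  60929, 11968, 12160, 61249, 11520, 60865, 60545, 11328,
  58369, 9408, 9600, 58689, 9984, 59329, 59009, 9792,
  8704, 58049, 58241, 9024, 57601, 8640, 8320, 57409,
  40961, 24768, 24960, 41281, 25344, 41921, 41601, 25152,
  26112, 42689, 42881, 26432, 42241, 26048, 25728, 42049,
  27648, 44225, 44417, 27968, 44801, 28608, 28288, 44609,
  43521, 27328, 27520, 43841, 26880, 43457, 43137, 26688,
  30720, 47297, 47489, 31040, 47873, 31680, 31360, 47681,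
  48641, 32448, 32640, 48961, 32000, 48577, 48257, 31808,
  46081, 29888, 30080, 46401, 30464, 47041, 46721, 30272,
  29184, 45761, 45953, 29504, 45313, 29120, 28800, 45121,
  20480, 37057, 37249, 20800, 37633, 21440, 21120, 37441,
  38401, 22208, 22400, 38721, 21760, 38337, 38017, 21568,
  39937, 23744, 23936, 40257, 24320, 40897, 40577, 24128,
  23040, 39617, 39809, 23360, 39169, 22976, 22656, 38977,
  34817, 18624, 18816, 35137, 19200, 35777, 35457, 19008,
  19968, 36545, 36737, 20288, 36097, 19904, 19584, 35905,
  17408, 33985, 34177, 17728, 34561, 18368, 18048, 34369,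
  33281, 17088, 17280, 33601, 16640, 33217, 32897, 16448
]

def crcChar_alt (crc : Int) (data : String) : Int :=
  match data.toList with
  | [] => 0
  | [ch] =>
    -- b = ord(data); raises TypeError unless the string has exactly one character (outside Pre_)
    let b : Int := ch.toNat
    let c := PySem.Int.band crc 65535
    PySem.Int.bxor (c >>> (8:Nat))
      ((PySem.List.pyGet? crcTable (PySem.Int.band (PySem.Int.bxor c b) 255)).getD 0)
  | _ :: _ :: _ => 0

-- ===== PRECONDITION & SPEC =====
-- ord(data) raises TypeError unless data has exactly one character; Pre_ excludes exactly those inputs.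
def Pre_crcChar (crc : Int) (data : String) : Prop := data.toList.length = 1
instance (crc : Int) (data : String) : Decidable (Pre_crcChar crc data) := by unfold Pre_crcChar; infer_instance
def pvWitness_crcChar : Int × String := (0, "a")
def Spec_crcChar (crc : Int) (data : String) (out : Int) : Prop := out = crcChar_alt crc data
instance (crc : Int) (data : String) (out : Int) : Decidable (Spec_crcChar crc data out) := by unfold Spec_crcChar; infer_instance

-- ===== CLAIM (what is proved, stated in full; the proofs are below) =====
def Claim_equal_crcChar : Prop := ∀ (crc : Int) (data : String), Dom_crcChar crc data → Pre_crcChar crc data → Spec_crcChar crc data (crcChar crc data)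

-- ===== LEMMAS AND PROOFS =====


-- Nat layer
def SN (x d : Nat) : Nat := ((x % 65536) >>> 1) ^^^ (if (x + d) % 2 = 1 then 40961 else 0)

def L8 (x b : Nat) : Nat :=
  SN (SN (SN (SN (SN (SN (SN (SN x ((b >>> 0) % 2)) ((b >>> 1) % 2)) ((b >>> 2) % 2)) ((b >>> 3) % 2)) ((b >>> 4) % 2)) ((b >>> 5) % 2)) ((b >>> 6) % 2)) ((b >>> 7) % 2)

theorem xor_parity (a b : Nat) : (a ^^^ b) % 2 = (a + b) % 2 := by
  have h := Nat.and_xor_distrib_right (a := a) (b := b) (c := 1)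
  simp [Nat.and_one_is_mod] at h
  rcases Nat.mod_two_eq_zero_or_one a with h1 | h1 <;>
  rcases Nat.mod_two_eq_zero_or_one b with h2 | h2 <;>
    simp [h1, h2] at h ⊢ <;> omega

theorem xor_mod_two_pow (a b k : Nat) : (a ^^^ b) % 2 ^ k = a % 2 ^ k ^^^ b % 2 ^ k := by
  rw [← Nat.and_two_pow_sub_one_eq_mod, ← Nat.and_two_pow_sub_one_eq_mod, ← Nat.and_two_pow_sub_one_eq_mod,
    Nat.and_xor_distrib_right]

theorem SN_lt (x d : Nat) : SN x d < 65536 := by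
  have h1 : (x % 65536) >>> 1 < 65536 := by
    rw [Nat.shiftRight_eq_div_pow]; omega
  have : ∀ e, e < 65536 → ((x % 65536) >>> 1) ^^^ e < 65536 := by
    intro e he
    have := Nat.xor_lt_two_pow (n := 16) (x := (x % 65536) >>> 1) (y := e) (by omega) (by omega)
    omega
  unfold SN
  split <;> [exact this _ (by omega); exact this _ (by omega)]

theorem lin (u s d : Nat) (hu : u < 65536) (he : u % 2 = 0) :
    SN (u ^^^ s) d = (u >>> 1) ^^^ SN s d := by
  unfold SN
  have hp : (u ^^^ s) % 2 = s % 2 := by rw [xor_parity]; omega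
  have hsh : ((u ^^^ s) % 65536) >>> 1 = (u >>> 1) ^^^ ((s % 65536) >>> 1) := by
    have h65536 : (65536 : Nat) = 2 ^ 16 := by norm_num
    rw [h65536, xor_mod_two_pow, Nat.shiftRight_xor_distrib, ← h65536, Nat.mod_eq_of_lt hu]
  have hpar : ((u ^^^ s) + d) % 2 = (s + d) % 2 := by omega
  rw [hsh, hpar, Nat.xor_assoc]

theorem inj (y t : Nat) (ht : t < 65536) :
    SN (y ^^^ t) (t % 2) = SN y 0 ^^^ (t >>> 1) := by
  unfold SN
  have hp : (y ^^^ t) % 2 = (y + t) % 2 := xor_parity y t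
  have hpar : ((y ^^^ t) + t % 2) % 2 = (y + 0) % 2 := by omega
  have hsh : ((y ^^^ t) % 65536) >>> 1 = ((y % 65536) >>> 1) ^^^ (t >>> 1) := by
    have h65536 : (65536 : Nat) = 2 ^ 16 := by norm_num
    rw [h65536, xor_mod_two_pow, Nat.shiftRight_xor_distrib, ← h65536, Nat.mod_eq_of_lt ht]
  rw [hsh, hpar]
  rw [Nat.xor_assoc, Nat.xor_comm (t >>> 1), ← Nat.xor_assoc]

theorem shiftRight_shiftRight (x a b : Nat) : (x >>> a) >>> b = x >>> (a + b) := by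
  simp [Nat.shiftRight_eq_div_pow, Nat.div_div_eq_div_mul, pow_add]

def SNchain (x b : Nat) : Nat → Nat
  | 0 => x
  | k + 1 => SN (SNchain x b k) ((b >>> k) % 2)

theorem L8_eq_chain (x b : Nat) : L8 x b = SNchain x b 8 := rfl

theorem chain_inj (x b : Nat) (hb : b < 65536) :
    ∀ k, SNchain x b k = SNchain (x ^^^ b) 0 k ^^^ (b >>> k) := by
  intro k
  induction k with
  | zero => simp [SNchain]
  | succ k ih =>
    have ht : b >>> k < 65536 := by
      rw [Nat.shiftRight_eq_div_pow]; exact lt_of_le_of_lt (Nat.div_le_self _ _) hb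
    calc SNchain x b (k+1) = SN (SNchain (x ^^^ b) 0 k ^^^ (b >>> k)) ((b >>> k) % 2) := by
            rw [SNchain, ih]
      _ = SN (SNchain (x ^^^ b) 0 k) 0 ^^^ ((b >>> k) >>> 1) := inj _ _ ht
      _ = SNchain (x ^^^ b) 0 (k+1) ^^^ (b >>> (k+1)) := by
            rw [SNchain, shiftRight_shiftRight]
            simp

theorem shiftLeft_shiftRight_one (hi j : Nat) (hj : 1 ≤ j) : (hi <<< j) >>> 1 = hi <<< (j - 1) := by
  rcases Nat.exists_eq_add_of_le hj with ⟨m, rfl⟩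
  rw [Nat.shiftLeft_eq, Nat.shiftLeft_eq, Nat.shiftRight_eq_div_pow]
  have h1 : 1 + m - 1 = m := by omega
  rw [h1, pow_one, pow_add, pow_one]
  rw [show hi * (2 * 2 ^ m) = hi * 2 ^ m * 2 by ring]
  exact Nat.mul_div_cancel _ (by norm_num)

theorem chain_lin (hi s : Nat) (hhi : hi < 256) :
    ∀ k, k ≤ 8 → SNchain ((hi <<< 8) ^^^ s) 0 k = (hi <<< (8 - k)) ^^^ SNchain s 0 k := by
  intro k
  induction k with
  | zero => intro _; simp [SNchain]
  | succ k ih =>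
    intro hk
    have hu : hi <<< (8 - k) < 65536 := by
      rw [Nat.shiftLeft_eq]
      have : (2:Nat) ^ (8 - k) ≤ 2 ^ 8 := Nat.pow_le_pow_right (by norm_num) (by omega)
      calc hi * 2 ^ (8 - k) ≤ hi * 2 ^ 8 := Nat.mul_le_mul_left _ this
        _ < 256 * 256 := by omega
        _ = 65536 := by norm_num
    have he : hi <<< (8 - k) % 2 = 0 := by
      rw [Nat.shiftLeft_eq]
      rw [show (2:Nat) ^ (8 - k) = 2 * 2 ^ (8 - k - 1) by rw [← pow_succ']; congr 1; omega]
      rw [show hi * (2 * 2 ^ (8 - k - 1)) = 2 * (hi * 2 ^ (8 - k - 1)) by ring]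
      exact Nat.mul_mod_right _ _
    calc SNchain ((hi <<< 8) ^^^ s) 0 (k+1) = SN ((hi <<< (8 - k)) ^^^ SNchain s 0 k) ((0 >>> k) % 2) := by
           rw [SNchain, ih (by omega)]
      _ = (hi <<< (8 - k)) >>> 1 ^^^ SN (SNchain s 0 k) ((0 >>> k) % 2) := lin _ _ _ hu he
      _ = (hi <<< (8 - (k+1))) ^^^ SNchain s 0 (k+1) := by
           rw [SNchain, shiftLeft_shiftRight_one _ _ (by omega),
             show 8 - k - 1 = 8 - (k+1) from by omega]

theorem split16 (z : Nat) (hz : z < 65536) : z = ((z >>> 8) <<< 8) ^^^ (z &&& 255) := by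
  apply Nat.eq_of_testBit_eq
  intro i
  rw [Nat.testBit_xor, Nat.testBit_shiftLeft, Nat.testBit_and]
  rcases Nat.lt_or_ge i 8 with h | h
  · have h255 : (255 : Nat).testBit i = true := by
      interval_cases i <;> decide
    simp [h255, show ¬ (i ≥ 8) from by omega]
  · have h255 : (255 : Nat).testBit i = false := by
      apply Nat.testBit_lt_two_pow
      calc (255:Nat) < 2 ^ 8 := by norm_num
        _ ≤ 2 ^ i := Nat.pow_le_pow_right (by norm_num) h
    rw [Nat.testBit_shiftRight]
    simp [h255, show i ≥ 8 from h, show 8 + (i - 8) = i from by omega]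

theorem main8 (x b : Nat) (hx : x < 65536) (hb : b < 256) :
    L8 x b = (x >>> 8) ^^^ L8 ((x ^^^ b) &&& 255) 0 := by
  have hxb : x ^^^ b < 65536 :=
    Nat.xor_lt_two_pow (n := 16) (by omega) (by omega)
  have hsh : (x ^^^ b) >>> 8 = x >>> 8 := by
    rw [Nat.shiftRight_xor_distrib, Nat.shiftRight_eq_div_pow b 8,
      Nat.div_eq_of_lt (by omega), Nat.xor_zero]
  have h1 : L8 x b = L8 (x ^^^ b) 0 := by
    rw [L8_eq_chain, L8_eq_chain, chain_inj x b (by omega) 8,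
      Nat.shiftRight_eq_div_pow b 8, Nat.div_eq_of_lt (by omega), Nat.xor_zero]
  have h2 : x ^^^ b = ((x >>> 8) <<< 8) ^^^ ((x ^^^ b) &&& 255) := by
    conv_lhs => rw [split16 (x ^^^ b) hxb]
    rw [hsh]
  have hhi : x >>> 8 < 256 := by
    rw [Nat.shiftRight_eq_div_pow]; omega
  rw [h1]
  conv_lhs => rw [h2]
  rw [L8_eq_chain, L8_eq_chain, chain_lin (x >>> 8) _ hhi 8 (by omega)]
  simp

theorem tb_false {v : Nat} (k i : Nat) (hv : v < 2 ^ k) (h : k ≤ i) : v.testBit i = false :=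
  Nat.testBit_lt_two_pow (lt_of_lt_of_le hv (Nat.pow_le_pow_right (by norm_num) h))

theorem testBit_div (m i : Nat) : m.testBit i = decide (m / 2 ^ i % 2 = 1) := by
  rw [Nat.testBit, Nat.shiftRight_eq_div_pow]
  have h1 : 1 &&& (m / 2 ^ i) = (m / 2 ^ i) % 2 := by
    rw [Nat.and_comm, Nat.and_one_is_mod]
  rw [h1]
  rcases Nat.mod_two_eq_zero_or_one (m / 2 ^ i) with h | h <;> simp [h]

theorem assemble (m p : Nat) (hm : m < 32768) (hp : p < 2) :
    ((m &&& 24574) ||| ((m % 2 ^^^ p) &&& 1)) ||| ((((m >>> 13) % 2 ^^^ p) &&& 1) <<< 13) ||| (p <<< 15)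
      = m ^^^ (if p = 1 then 40961 else 0) := by
  simp only [← Nat.and_one_is_mod]
  apply Nat.eq_of_testBit_eq
  intro i
  rcases Nat.lt_or_ge i 16 with h | h
  · interval_cases p <;> interval_cases i <;>
      simp only [Nat.testBit_or, Nat.testBit_and, Nat.testBit_xor, Nat.testBit_shiftLeft,
        Nat.testBit_shiftRight] <;>
      simp only [testBit_div] <;>
      (try rw [Bool.eq_iff_iff]) <;> (try norm_num) <;> omega
  · have h24574 : (24574:Nat).testBit i = false := tb_false 16 i (by norm_num) h
    have h40961 : (40961:Nat).testBit i = false := tb_false 16 i (by norm_num) h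
    have hmb : m.testBit i = false := tb_false 16 i (by omega) h
    have e0 : Nat.testBit 1 i = false := tb_false 1 i (by norm_num) (by omega)
    have e13 : Nat.testBit 1 (i - 13) = false := tb_false 1 (i - 13) (by norm_num) (by omega)
    have ep15 : p.testBit (i - 15) = false := tb_false 1 (i - 15) (by omega) (by omega)
    simp only [Nat.testBit_or, Nat.testBit_and, Nat.testBit_xor, Nat.testBit_shiftLeft,
      Nat.testBit_shiftRight, h24574, h40961, hmb, e0, e13, ep15, Bool.and_false,
      Bool.false_and, Bool.or_false, Bool.false_or, Bool.false_xor, Bool.xor_false]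
    split <;> simp [h40961, hmb]

theorem and_parity (a b : Nat) : (a &&& b) % 2 = a % 2 * (b % 2) := by
  rw [← Nat.and_one_is_mod (a &&& b), Nat.and_assoc, Nat.and_one_is_mod b]
  rcases Nat.mod_two_eq_zero_or_one b with h2 | h2 <;> rw [h2]
  · simp
  · rw [Nat.and_one_is_mod]
    omega

theorem sub_of_subset : ∀ c x : Nat, x &&& c = x → c ^^^ x = c - x := by
  intro c
  induction c using Nat.strong_induction_on with
  | _ c ih =>
    intro x hx
    rcases Nat.eq_zero_or_pos c with hc | hc
    · subst hc
      have hx0 : x = 0 := by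
        have := hx.symm
        simpa using this
      simp [hx0]
    · have hdiv : (x / 2) &&& (c / 2) = x / 2 := by
        have := Nat.shiftRight_and_distrib (i := 1) (a := x) (b := c)
        simp [Nat.shiftRight_eq_div_pow] at this
        rw [← this, hx]
      have hle : x ≤ c := by
        have := @Nat.and_le_right x c
        omega
      have hle2 : x / 2 ≤ c / 2 := by
        have := @Nat.and_le_right (x / 2) (c / 2)
        omega
      have hpar : x % 2 = x % 2 * (c % 2) := by
        conv_lhs => rw [← hx]
        rw [and_parity]
      have hparle : x % 2 ≤ c % 2 := by
        rcases Nat.mod_two_eq_zero_or_one c with h | h <;> rcases Nat.mod_two_eq_zero_or_one x with h' | h' <;>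
          simp [h, h'] at hpar ⊢ <;> omega
      have ihc := ih (c / 2) (by omega) (x / 2) hdiv
      have hxparity : (c ^^^ x) % 2 = (c + x) % 2 := xor_parity c x
      have hxdiv : (c ^^^ x) / 2 = c / 2 ^^^ x / 2 := by
        have := Nat.shiftRight_xor_distrib (i := 1) (a := c) (b := x)
        simpa [Nat.shiftRight_eq_div_pow] using this
      have := Nat.div_add_mod (c ^^^ x) 2
      omega

theorem band24574_mod (y : Int) : PySem.Int.band y 24574 = PySem.Int.band (y % 32768) 24574 := by
  have hself : (24574 : Nat) &&& 32767 = 24574 := by decide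
  rcases (Int.lt_or_le y 0).symm with hy | hy
  · rw [PySem.Int.band_of_nonneg hy (by norm_num),
      PySem.Int.band_of_nonneg (by omega) (by norm_num)]
    have ht : (y % 32768).toNat = y.toNat % 32768 := by omega
    rw [ht]
    show _ = ((y.toNat % 32768 &&& (24574:Int).toNat : Nat) : Int)
    have : y.toNat % 32768 &&& 24574 = y.toNat &&& 24574 := by
      rw [show (32768:Nat) = 2 ^ 15 by norm_num, ← Nat.and_two_pow_sub_one_eq_mod,
        show (2:Nat) ^ 15 - 1 = 32767 by norm_num, Nat.and_assoc,
        show (32767:Nat) &&& 24574 = 24574 by decide]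
    simp [this]
  · -- negative branch of band
    have h1 : PySem.Int.band y 24574 = ((24574 - ((24574:Nat) &&& (-y - 1).toNat) : Nat) : Int) := by
      unfold PySem.Int.band
      rw [if_neg (by omega), if_pos (by norm_num)]
      norm_num [show Int.toNat 24574 = 24574 from rfl, show Int.toNat 65535 = 65535 from rfl]
    set n := (-y - 1).toNat with hn
    have hyn : y = -1 - (n : Int) := by omega
    have h2 : ((y % 32768).toNat : Int) = 32767 - (((n % 32768 : Nat)) : Int) := by
      have : ((n : Int)) % 32768 = ((n % 32768 : Nat) : Int) := by push_cast; rfl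
      omega
    have h3 : (24574:Nat) &&& n = 24574 &&& (n % 32768) := by
      conv_lhs => rw [← hself, Nat.and_assoc]
      rw [show (32768:Nat) = 2 ^ 15 by norm_num, ← Nat.and_two_pow_sub_one_eq_mod,
        show (2:Nat) ^ 15 - 1 = 32767 by norm_num, Nat.and_comm 32767 n]
    have h4 : (32767 - n % 32768) &&& 24574 = 24574 - (24574 &&& (n % 32768)) := by
      have hr : n % 32768 < 32768 := Nat.mod_lt _ (by norm_num)
      have hcompl : 32767 - n % 32768 = 32767 ^^^ (n % 32768) := by
        have hsub : (n % 32768) &&& 32767 = n % 32768 := by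
          rw [show (32767:Nat) = 2 ^ 15 - 1 by norm_num, Nat.and_two_pow_sub_one_eq_mod]
          omega
        rw [sub_of_subset 32767 (n % 32768) hsub]
      rw [hcompl, Nat.and_xor_distrib_right, show (32767:Nat) &&& 24574 = 24574 by decide]
      have hsub2 : ((n % 32768) &&& 24574) &&& 24574 = (n % 32768) &&& 24574 := by
        rw [Nat.and_assoc, show (24574:Nat) &&& 24574 = 24574 from Nat.and_self _]
      rw [sub_of_subset 24574 ((n % 32768) &&& 24574) hsub2, Nat.and_comm (n % 32768) 24574]
    rw [h1, PySem.Int.band_of_nonneg (by omega) (by norm_num)]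
    show _ = (((y % 32768).toNat &&& (24574:Int).toNat : Nat) : Int)
    rw [show (24574:Int).toNat = 24574 from rfl]
    have h5 : (y % 32768).toNat = 32767 - n % 32768 := by omega
    rw [h5, h4, h3]

theorem band65535_mod (y : Int) : PySem.Int.band y 65535 = y % 65536 := by
  rcases (Int.lt_or_le y 0).symm with hy | hy
  · rw [PySem.Int.band_of_nonneg hy (by norm_num)]
    show ((y.toNat &&& (65535:Int).toNat : Nat) : Int) = _
    rw [show ((65535:Int).toNat) = 2 ^ 16 - 1 by decide, Nat.and_two_pow_sub_one_eq_mod]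
    omega
  · have h1 : PySem.Int.band y 65535 = ((65535 - ((65535:Nat) &&& (-y - 1).toNat) : Nat) : Int) := by
      unfold PySem.Int.band
      rw [if_neg (by omega), if_pos (by norm_num)]
      norm_num [show Int.toNat 24574 = 24574 from rfl, show Int.toNat 65535 = 65535 from rfl]
    set n := (-y - 1).toNat with hn
    have h2 : (65535:Nat) &&& n = n % 65536 := by
      rw [Nat.and_comm, show (65535:Nat) = 2 ^ 16 - 1 by norm_num, Nat.and_two_pow_sub_one_eq_mod]
    rw [h1, h2]
    have : n % 65536 < 65536 := Nat.mod_lt _ (by norm_num)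
    omega

theorem key (m p : Nat) (hm : m < 32768) (hp : p < 2) :
    PySem.Int.bor
      (PySem.Int.bor
        (PySem.Int.bor ((m &&& 24574 : Nat) : Int) (((m % 2 ^^^ p) &&& 1 : Nat) : Int))
        (((((m >>> 13) % 2 ^^^ p) &&& 1 : Nat) : Int) <<< (13:Nat)))
      (((p : Nat) : Int) <<< (15:Nat))
    = ((m ^^^ (if p = 1 then 40961 else 0) : Nat) : Int) := by
  rw [show (((((m >>> 13) % 2 ^^^ p) &&& 1 : Nat) : Int)) <<< (13:Nat) = (((((m >>> 13) % 2 ^^^ p) &&& 1) <<< (13:Nat) : Nat) : Int) from (Int.natCast_shiftLeft _ _).symm,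
    show ((p : Nat) : Int) <<< (15:Nat) = ((p <<< (15:Nat) : Nat) : Int) from (Int.natCast_shiftLeft _ _).symm,
    PySem.Int.bor_natCast, PySem.Int.bor_natCast, PySem.Int.bor_natCast,
    assemble m p hm hp]


theorem band_cast_one (a : Nat) : PySem.Int.band ((a:Nat):Int) 1 = ((a &&& 1 : Nat) : Int) := by
  rw [show (1:Int) = ((1:Nat):Int) from rfl, PySem.Int.band_natCast]

theorem bxor_cast0 (a : Nat) : PySem.Int.bxor ((a:Nat):Int) (((0:Nat)):Int) = ((a ^^^ 0 : Nat) : Int) := by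
  rw [PySem.Int.bxor_natCast]

theorem bxor_cast1 (a : Nat) : PySem.Int.bxor ((a:Nat):Int) (((1:Nat)):Int) = ((a ^^^ 1 : Nat) : Int) := by
  rw [PySem.Int.bxor_natCast]

theorem stepInt (x dI : Int) (hd : dI = 0 ∨ dI = 1) :
    (PySem.Int.bor
      (PySem.Int.bor
        (PySem.Int.bor (PySem.Int.band (x >>> (1:Nat)) 24574)
          (PySem.Int.band (PySem.Int.bxor (PySem.Int.band (x >>> (1:Nat)) 1) (PySem.Int.band (PySem.Int.bxor (PySem.Int.band x 1) dI) 1)) 1))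
        ((PySem.Int.band (PySem.Int.bxor (PySem.Int.band (x >>> (14:Nat)) 1) (PySem.Int.band (PySem.Int.bxor (PySem.Int.band x 1) dI) 1)) 1) <<< (13:Nat)))
      ((PySem.Int.band (PySem.Int.bxor (PySem.Int.band x 1) dI) 1) <<< (15:Nat)))
    = ((SN (x % 65536).toNat dI.toNat : Nat) : Int) := by
  have hsh1 : x >>> (1:Nat) = x / 2 := by simpa using Int.shiftRight_eq_div_pow x 1
  have hsh14 : x >>> (14:Nat) = x / 16384 := by
    have := Int.shiftRight_eq_div_pow x 14
    norm_num at this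
    exact this
  have hx1 : PySem.Int.band x 1 = x % 2 := by
    rw [PySem.Int.band_one, PySem.Int.mod_eq_emod_of_pos (by norm_num)]
  have hb1 : PySem.Int.band (x >>> (1:Nat)) 1 = (x / 2) % 2 := by
    rw [hsh1, PySem.Int.band_one, PySem.Int.mod_eq_emod_of_pos (by norm_num)]
  have hb14 : PySem.Int.band (x >>> (14:Nat)) 1 = (x / 16384) % 2 := by
    rw [hsh14, PySem.Int.band_one, PySem.Int.mod_eq_emod_of_pos (by norm_num)]
  set mN : Nat := ((x / 2) % 32768).toNat with hmN
  have hmlt : mN < 32768 := by omega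
  have hc4 : PySem.Int.band (x >>> (1:Nat)) 24574 = ((mN &&& 24574 : Nat) : Int) := by
    rw [hsh1, band24574_mod, show (x / 2) % 32768 = ((mN : Nat) : Int) from by omega,
      PySem.Int.band_of_nonneg (by omega) (by norm_num)]
    norm_num [show Int.toNat 24574 = 24574 from rfl]
  have hmb1 : x / (2:Int) % (2:Int) = ((mN % 2 : Nat) : Int) := by push_cast; omega
  have hmb14 : x / (16384:Int) % (2:Int) = (((mN >>> 13) % 2 : Nat) : Int) := by
    rw [Nat.shiftRight_eq_div_pow]
    push_cast
    omega
  have hrN : (x % 65536).toNat % 65536 = (x % 65536).toNat := by omega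
  have hrsh : (x % 65536).toNat >>> 1 = mN := by
    rw [Nat.shiftRight_eq_div_pow]
    omega
  rcases hd with hd | hd <;> rcases (by omega : x % 2 = 0 ∨ x % 2 = 1) with hx2 | hx2 <;>
    subst hd <;>
    rw [hx1, hx2]
  · rw [show PySem.Int.band (PySem.Int.bxor 0 0) 1 = ((0:Nat):Int) from by decide]
    rw [hb1, hb14, hmb1, hmb14, hc4, bxor_cast0, bxor_cast0, band_cast_one, band_cast_one]
    rw [key mN 0 hmlt (by norm_num)]
    unfold SN
    rw [hrN, hrsh]
    norm_num
    rw [if_neg (by omega)]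
    simp
  · rw [show PySem.Int.band (PySem.Int.bxor 1 0) 1 = ((1:Nat):Int) from by decide]
    rw [hb1, hb14, hmb1, hmb14, hc4, bxor_cast1, bxor_cast1, band_cast_one, band_cast_one]
    rw [key mN 1 hmlt (by norm_num)]
    unfold SN
    rw [hrN, hrsh]
    norm_num
    omega
  · rw [show PySem.Int.band (PySem.Int.bxor 0 1) 1 = ((1:Nat):Int) from by decide]
    rw [hb1, hb14, hmb1, hmb14, hc4, bxor_cast1, bxor_cast1, band_cast_one, band_cast_one]
    rw [key mN 1 hmlt (by norm_num)]
    unfold SN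
    rw [hrN, hrsh]
    norm_num
    omega
  · rw [show PySem.Int.band (PySem.Int.bxor 1 1) 1 = ((0:Nat):Int) from by decide]
    rw [hb1, hb14, hmb1, hmb14, hc4, bxor_cast0, bxor_cast0, band_cast_one, band_cast_one]
    rw [key mN 0 hmlt (by norm_num)]
    unfold SN
    rw [hrN, hrsh]
    norm_num
    rw [if_neg (by omega)]
    simp

theorem dataBit (bn k : Nat) : PySem.Int.band (((bn:Nat):Int) >>> k) 1 = (((bn >>> k) % 2 : Nat) : Int) := by
  rw [← Int.natCast_shiftRight, band_cast_one, Nat.and_one_is_mod]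

theorem snmod (a b : Nat) : ((((SN a b : Nat) : Int)) % 65536).toNat = SN a b := by
  have := SN_lt a b
  omega

theorem hd_of_mod (v : Nat) : ((v % 2 : Nat) : Int) = 0 ∨ ((v % 2 : Nat) : Int) = 1 := by omega

set_option maxHeartbeats 1000000 in
set_option maxRecDepth 4000 in
theorem tbl_ok : ∀ i : Fin 256, (PySem.List.pyGet? crcTable (i.1 : Int)).getD 0 = ((L8 i.1 0 : Nat) : Int) := by decide

theorem stepA_eq (bn : Nat) (x j : Int) (hj : 0 ≤ j) :
    crcStep ((bn:Nat):Int) x j = ((SN (x % 65536).toNat ((bn >>> j.toNat) % 2) : Nat) : Int) := by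
  unfold crcStep
  rw [dataBit]
  rw [stepInt _ _ (hd_of_mod _), Int.toNat_natCast]

theorem crcA_eq (crc : Int) (ch : Char) (data : String) (h : data.toList = [ch]) :
    crcChar crc data = ((L8 (crc % 65536).toNat ch.toNat : Nat) : Int) := by
  unfold crcChar
  rw [h]
  rw [show PySem.List.pyRange 0 8 1 = [0,1,2,3,4,5,6,7] from by decide]
  simp only [List.foldl_cons, List.foldl_nil]
  rw [stepA_eq _ _ _ (by norm_num), stepA_eq _ _ _ (by norm_num), stepA_eq _ _ _ (by norm_num),
    stepA_eq _ _ _ (by norm_num), stepA_eq _ _ _ (by norm_num), stepA_eq _ _ _ (by norm_num),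
    stepA_eq _ _ _ (by norm_num), stepA_eq _ _ _ (by norm_num)]
  simp only [snmod, Int.toNat_natCast]
  rw [show ((0:Int).toNat) = 0 from rfl, show ((1:Int).toNat) = 1 from rfl,
    show ((2:Int).toNat) = 2 from rfl, show ((3:Int).toNat) = 3 from rfl,
    show ((4:Int).toNat) = 4 from rfl, show ((5:Int).toNat) = 5 from rfl,
    show ((6:Int).toNat) = 6 from rfl, show ((7:Int).toNat) = 7 from rfl]
  rfl

theorem crcB_eq (crc : Int) (ch : Char) (data : String) (h : data.toList = [ch]) :
    crcChar_alt crc data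
      = (((((crc % 65536).toNat >>> 8) ^^^ L8 (((crc % 65536).toNat ^^^ ch.toNat) &&& 255) 0 : Nat)) : Int) := by
  unfold crcChar_alt
  rw [h]
  simp only
  rw [band65535_mod]
  conv_lhs => rw [show crc % 65536 = (((crc % 65536).toNat : Nat) : Int) from by omega]
  rw [PySem.Int.bxor_natCast, show (255:Int) = ((255:Nat):Int) from rfl, PySem.Int.band_natCast,
    ← Int.natCast_shiftRight]
  have hidx : ((crc % 65536).toNat ^^^ ch.toNat) &&& 255 < 256 := by
    have : ((crc % 65536).toNat ^^^ ch.toNat) &&& 255 ≤ 255 := Nat.and_le_right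
    omega
  rw [tbl_ok ⟨((crc % 65536).toNat ^^^ ch.toNat) &&& 255, hidx⟩, PySem.Int.bxor_natCast]

-- ===== VERDICT (by name: the statement is the Claim_ definition above) =====
theorem crcChar_spec : Claim_equal_crcChar := by
  intro crc data hDom hPre
  unfold Spec_crcChar
  obtain ⟨ch, h⟩ := List.length_eq_one_iff.mp hPre
  have hb : ch.toNat < 256 := by
    have hDom' : pvDomStr data = true := by
      unfold Dom_crcChar at hDom
      rw [Bool.and_eq_true] at hDom
      exact hDom.2
    unfold pvDomStr at hDom'
    rw [h] at hDom'
    simp only [List.all_cons, List.all_nil, Bool.and_true] at hDom'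
    unfold pvDomChar at hDom'
    simp at hDom'
    omega
  have hr : (crc % 65536).toNat < 65536 := by omega
  rw [crcA_eq crc ch data h, crcB_eq crc ch data h, main8 _ _ hr hb]
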